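-- pv_equiv track=rewrite | github.com/fengyue723/pacman_competition | pacman-contest/myTeam-Q.py | repeatedHistory
-- ===== SOURCE A (Python) =====
-- def repeatedHistory(history):
--     if len(history)>3 and history[-4:-2]==history[-2:] and history[-1] != history[-2]:
--         single = history[-2:]
--         i = 2
--         left = history[:-4]
--         while len(left)>=2 and left[-2:] == single:
--             i += 1
--             left = left[:-2]
--         return i
--     elif len(history)>7 and history[-8:-4]==history[-4:] and history[-1] != history[-3]:
--         single = history[-4:]
--         i = 2
--         left = history[:-8]
--         while len(left)>=4 and left[-4:] == single:
--             i += 1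
--             left = left[:-4]
--         return i
--     elif len(history)>11 and history[-12:-6]==history[-6:] and history[-1] != history[-4]:
--         single = history[-6:]
--         i = 2
--         left = history[:-12]
--         while len(left)>=6 and left[-6:] == single:
--             i += 1
--             left = left[:-6]
--         return i
--     else:
--         return 1
-- ===== SOURCE B (Python) =====
-- def repeatedHistory(history):
--     n = len(history)
--     for p in (2, 4, 6):
--         if n < 2 * p or history[n - 1] == history[n - 1 - p // 2]:
--             continue
--         # count trailing blocks of length p equal to the last block, by index
--         k = 1
--         while (k + 1) * p <= n and all(
--             history[n - (k + 1) * p + t] == history[n - p + t] for t in range(p)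
--         ):
--             k += 1
--         if k >= 2:
--             return k
--     return 1
-- ===== Notes on version B (the rewrite author's own statement) =====
-- stated objective: alternative
-- what changed: A repeatedly re-slices the list (copying a shrinking prefix on every loop iteration) and compares whole slice copies; B never builds a sublist: it walks block positions by index arithmetic and compares each candidate block to the last block element by element, counting trailing repetitions in one backward scan (A's copying is quadratic only on long periodic tails, which random timing inputs do not exercise).
import Mathlib
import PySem

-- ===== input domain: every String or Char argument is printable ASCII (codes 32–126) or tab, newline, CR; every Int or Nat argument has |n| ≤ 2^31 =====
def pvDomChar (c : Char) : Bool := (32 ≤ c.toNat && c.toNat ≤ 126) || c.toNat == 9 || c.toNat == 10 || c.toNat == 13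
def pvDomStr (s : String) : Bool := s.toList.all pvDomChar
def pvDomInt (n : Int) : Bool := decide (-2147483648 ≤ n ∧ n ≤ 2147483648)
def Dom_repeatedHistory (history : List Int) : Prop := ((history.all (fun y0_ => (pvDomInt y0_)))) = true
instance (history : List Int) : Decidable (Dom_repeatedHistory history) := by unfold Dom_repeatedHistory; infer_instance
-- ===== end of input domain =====

-- B replaces A's repeated list slicing with an index-based backward block scan that never builds sublists; objective: alternative.

-- ===== PORT A =====
-- A's three while-loops are the same code with block size 2/4/6; ported once with the size as a parameter
def aLoop (m : Nat) (hm : 0 < m) (single : List Int) (left : List Int) (i : Int) : Int :=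
  if m ≤ left.length ∧ PySem.List.slice left (some (-(m : Int))) none = single then
    aLoop m hm single (PySem.List.slice left none (some (-(m : Int)))) (i + 1)
  else i
termination_by left.length
decreasing_by
  rename_i hc
  rw [PySem.List.slice_to_neg_natCast left m hm]
  simp only [List.length_take]
  omega

def repeatedHistory (history : List Int) : Int :=
  if 3 < history.length ∧
      PySem.List.slice history (some (-4)) (some (-2)) = PySem.List.slice history (some (-2)) none ∧
      PySem.List.pyGet? history (-1) ≠ PySem.List.pyGet? history (-2) then
    aLoop 2 (by norm_num) (PySem.List.slice history (some (-2)) none)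
      (PySem.List.slice history none (some (-4))) 2
  else if 7 < history.length ∧
      PySem.List.slice history (some (-8)) (some (-4)) = PySem.List.slice history (some (-4)) none ∧
      PySem.List.pyGet? history (-1) ≠ PySem.List.pyGet? history (-3) then
    aLoop 4 (by norm_num) (PySem.List.slice history (some (-4)) none)
      (PySem.List.slice history none (some (-8))) 2
  else if 11 < history.length ∧
      PySem.List.slice history (some (-12)) (some (-6)) = PySem.List.slice history (some (-6)) none ∧
      PySem.List.pyGet? history (-1) ≠ PySem.List.pyGet? history (-4) then
    aLoop 6 (by norm_num) (PySem.List.slice history (some (-6)) none)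
      (PySem.List.slice history none (some (-12))) 2
  else 1

-- ===== PORT B =====
-- all(history[n-(k+1)*p+t] == history[n-p+t] for t in range(p))
def blockEq (h : List Int) (p k : Nat) : Bool :=
  (List.range p).all (fun t => h[h.length - (k + 1) * p + t]? == h[h.length - p + t]?)

-- the while-loop: k += 1 while the next block (by index) equals the last block
def bCount (h : List Int) (p : Nat) (hp : 0 < p) (k : Nat) : Nat :=
  if (k + 1) * p ≤ h.length ∧ blockEq h p k then bCount h p hp (k + 1) else k
termination_by h.length - k * p
decreasing_by
  rename_i hc
  obtain ⟨hkp, -⟩ := hc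
  have h1 : (k + 1) * p = k * p + p := by ring
  omega

-- one iteration of the for-loop over p ∈ (2,4,6); none = "continue"
def bTry (h : List Int) (p : Nat) (hp : 0 < p) : Option Int :=
  let n := h.length
  if n < 2 * p then none
  else if h[n - 1]? == h[n - 1 - p / 2]? then none
  else
    let k := bCount h p hp 1
    if 2 ≤ k then some (k : Int) else none

def repeatedHistory_alt (history : List Int) : Int :=
  match bTry history 2 (by norm_num) with
  | some v => v
  | none =>
    match bTry history 4 (by norm_num) with
    | some v => v
    | none =>
      match bTry history 6 (by norm_num) with
      | some v => v
      | none => 1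

-- ===== PRECONDITION & SPEC =====
def Spec_repeatedHistory (history : List Int) (out : Int) : Prop := out = repeatedHistory_alt history
instance (history : List Int) (out : Int) : Decidable (Spec_repeatedHistory history out) := by unfold Spec_repeatedHistory; infer_instance

-- ===== CLAIM (what is proved, stated in full; the proofs are below) =====
def Claim_equal_repeatedHistory : Prop := ∀ (history : List Int), Dom_repeatedHistory history → Spec_repeatedHistory history (repeatedHistory history)

-- ===== LEMMAS AND PROOFS =====

-- blockEq unfolded to a pointwise statement
theorem blockEq_iff (h : List Int) (p k : Nat) :
    blockEq h p k = true ↔ ∀ t < p, h[h.length - (k + 1) * p + t]? = h[h.length - p + t]? := by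
  simp [blockEq, List.all_eq_true, List.mem_range]

-- take/drop block equality is pointwise equality of the corresponding indices
theorem drop_take_eq_iff (h : List Int) (a b m : Nat) :
    ((h.drop a).take m = (h.drop b).take m) ↔ ∀ t < m, h[a + t]? = h[b + t]? := by
  constructor
  · intro heq t ht
    have h1 : ((h.drop a).take m)[t]? = ((h.drop b).take m)[t]? := by rw [heq]
    simpa [List.getElem?_take, List.getElem?_drop, ht] using h1
  · intro hpt
    apply List.ext_getElem?
    intro t
    by_cases ht : t < m
    · simpa [List.getElem?_take, List.getElem?_drop, ht] using hpt t ht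
    · simp [ht]

-- the middle slice h[-2m:-m] as drop/take
theorem slice_mid (h : List Int) (m : Nat) (hm : 0 < m) (h2 : 2 * m ≤ h.length) :
    PySem.List.slice h (some (-(2 * m : Nat) : Int)) (some (-(m : Nat) : Int)) =
      (h.drop (h.length - 2 * m)).take m := by
  have e1 := PySem.List.clampIdx_neg_natCast h.length (2 * m) (by omega)
  have e2 := PySem.List.clampIdx_neg_natCast h.length m hm
  simp only [PySem.List.slice, e1, e2]
  congr 1
  omega

-- A's while-loop and B's while-loop compute the same count
theorem loop_eq (h : List Int) (m : Nat) (hm : 0 < m) :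
    ∀ N k, h.length - k * m ≤ N → 1 ≤ k → k * m ≤ h.length →
      aLoop m hm (h.drop (h.length - m)) (h.take (h.length - k * m)) (k : Int) =
        ((bCount h m hm k : Nat) : Int) := by
  intro N
  induction N with
  | zero =>
    intro k hN hk hkm
    have hlen : h.length - k * m = 0 := by omega
    rw [aLoop, bCount]
    have hc1 : ¬ (m ≤ (h.take (h.length - k * m)).length ∧
        PySem.List.slice (h.take (h.length - k * m)) (some (-(m : Int))) none = h.drop (h.length - m)) := by
      rintro ⟨hx, _⟩
      simp only [hlen, List.take_zero, List.length_nil] at hx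
      omega
    have hc2 : ¬ ((k + 1) * m ≤ h.length ∧ blockEq h m k = true) := by
      rintro ⟨h1, _⟩
      have : (k + 1) * m = k * m + m := by ring
      omega
    rw [if_neg hc1, if_neg hc2]
  | succ N ih =>
    intro k hN hk hkm
    have hlt : (h.take (h.length - k * m)).length = h.length - k * m := by
      simp only [List.length_take]; omega
    have hk1m : (k + 1) * m = k * m + m := by ring
    rw [aLoop, bCount]
    have hslice : PySem.List.slice (h.take (h.length - k * m)) (some (-(m : Int))) none =
        (h.take (h.length - k * m)).drop ((h.take (h.length - k * m)).length - m) :=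
      PySem.List.slice_from_neg_natCast _ m hm
    have hcondiff : (m ≤ (h.take (h.length - k * m)).length ∧
        PySem.List.slice (h.take (h.length - k * m)) (some (-(m : Int))) none = h.drop (h.length - m)) ↔
        ((k + 1) * m ≤ h.length ∧ blockEq h m k = true) := by
      rw [hslice, hlt]
      have e2 : h.drop (h.length - m) = (h.drop (h.length - m)).take m := by
        rw [List.take_of_length_le]; simp only [List.length_drop]; omega
      constructor
      · rintro ⟨h1, h2⟩
        have e1 : (h.take (h.length - k * m)).drop (h.length - k * m - m) =
            (h.drop (h.length - k * m - m)).take m := by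
          rw [List.drop_take]; congr 1; omega
        refine ⟨by omega, ?_⟩
        rw [e1] at h2
        nth_rewrite 1 [e2] at h2
        rw [blockEq_iff]
        have := (drop_take_eq_iff h (h.length - k * m - m) (h.length - m) m).mp h2
        intro t ht
        have e3 : h.length - (k + 1) * m + t = h.length - k * m - m + t := by omega
        rw [e3]; exact this t ht
      · rintro ⟨h1, h2⟩
        have e1 : (h.take (h.length - k * m)).drop (h.length - k * m - m) =
            (h.drop (h.length - k * m - m)).take m := by
          rw [List.drop_take]; congr 1; omega
        refine ⟨by omega, ?_⟩
        rw [e1]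
        nth_rewrite 1 [e2]
        rw [blockEq_iff] at h2
        apply (drop_take_eq_iff h (h.length - k * m - m) (h.length - m) m).mpr
        intro t ht
        have e3 : h.length - (k + 1) * m + t = h.length - k * m - m + t := by omega
        rw [← e3]; exact h2 t ht
    by_cases hc : (k + 1) * m ≤ h.length ∧ blockEq h m k = true
    · rw [if_pos (hcondiff.mpr hc), if_pos hc]
      have hnext : PySem.List.slice (h.take (h.length - k * m)) none (some (-(m : Int))) =
          h.take (h.length - (k + 1) * m) := by
        rw [PySem.List.slice_to_neg_natCast _ m hm, List.take_take, hlt]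
        congr 1
        omega
      rw [hnext]
      have hcast : ((k : Int) + 1) = (((k + 1 : Nat) : Nat) : Int) := by push_cast; ring
      rw [hcast]
      exact ih (k + 1) (by omega) (by omega) hc.1
    · rw [if_neg (fun hx => hc (hcondiff.mp hx)), if_neg hc]

-- bCount never decreases its counter
theorem bCount_ge (h : List Int) (m : Nat) (hm : 0 < m) :
    ∀ N k, h.length - k * m ≤ N → k ≤ bCount h m hm k := by
  intro N
  induction N with
  | zero =>
    intro k hN
    rw [bCount]
    split
    · rename_i hc
      have : (k + 1) * m = k * m + m := by ring
      omega
    · exact Nat.le_refl k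
  | succ N ih =>
    intro k hN
    rw [bCount]
    split
    · rename_i hc
      have h1 : (k + 1) * m = k * m + m := by ring
      have := ih (k + 1) (by omega)
      omega
    · exact Nat.le_refl k

-- bCount from 1 takes its first step exactly when blockEq h m 1 holds
theorem bCount_one (h : List Int) (m : Nat) (hm : 0 < m) (hc : 2 * m ≤ h.length ∧ blockEq h m 1 = true) :
    bCount h m hm 1 = bCount h m hm 2 := by
  rw [bCount]
  have : (1 + 1) * m = 2 * m := by ring
  rw [if_pos ⟨by omega, hc.2⟩]

theorem bCount_one_stop (h : List Int) (m : Nat) (hm : 0 < m) (hc : ¬ (2 * m ≤ h.length ∧ blockEq h m 1 = true)) :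
    bCount h m hm 1 = 1 := by
  rw [bCount]
  have h11 : (1 + 1) * m = 2 * m := by ring
  rw [if_neg (by rw [h11]; exact hc)]

-- one branch of A against one iteration of B's for-loop
theorem try_branch (h : List Int) (m : Nat) (hm : 0 < m) :
    (if 2 * m - 1 < h.length ∧
        PySem.List.slice h (some (-(2 * m : Nat) : Int)) (some (-(m : Nat) : Int)) =
          PySem.List.slice h (some (-(m : Nat) : Int)) none ∧
        PySem.List.pyGet? h (-1) ≠ PySem.List.pyGet? h (-(m / 2 + 1 : Nat) : Int) then
      some (aLoop m hm (PySem.List.slice h (some (-(m : Nat) : Int)) none)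
        (PySem.List.slice h none (some (-(2 * m : Nat) : Int))) 2)
    else none) = bTry h m hm := by
  by_cases hn : h.length < 2 * m
  · -- too short: both sides none
    rw [if_neg (by rintro ⟨h1, _⟩; omega)]
    rw [bTry]
    simp only [if_pos hn]
  · rw [Nat.not_lt] at hn
    have hfrom : PySem.List.slice h (some (-(m : Nat) : Int)) none = h.drop (h.length - m) :=
      PySem.List.slice_from_neg_natCast h m hm
    have hto : PySem.List.slice h none (some (-(2 * m : Nat) : Int)) = h.take (h.length - 2 * m) :=
      PySem.List.slice_to_neg_natCast h (2 * m) (by omega)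
    -- the distinctness tests agree
    have hg1 : PySem.List.pyGet? h (-1) = h[h.length - 1]? := by
      rw [PySem.List.pyGet?_neg_one, List.getLast?_eq_getElem?]
    have hg2 : PySem.List.pyGet? h (-(m / 2 + 1 : Nat) : Int) = h[h.length - 1 - m / 2]? := by
      rw [PySem.List.pyGet?_neg_natCast h (m / 2 + 1) (by omega) (by omega)]
      congr 1
      omega
    -- block-equality tests agree
    have hbl : (PySem.List.slice h (some (-(2 * m : Nat) : Int)) (some (-(m : Nat) : Int)) =
        PySem.List.slice h (some (-(m : Nat) : Int)) none) ↔ blockEq h m 1 = true := by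
      rw [slice_mid h m hm hn, hfrom, blockEq_iff]
      have e2 : h.drop (h.length - m) = (h.drop (h.length - m)).take m := by
        rw [List.take_of_length_le]; simp only [List.length_drop]; omega
      have base := drop_take_eq_iff h (h.length - 2 * m) (h.length - m) m
      rw [← e2] at base
      rw [base]
    by_cases hd : h[h.length - 1]? = h[h.length - 1 - m / 2]?
    · -- distinctness fails: both none
      rw [if_neg (by rintro ⟨_, _, h3⟩; exact h3 (by rw [hg1, hg2, hd])), bTry]
      simp only [if_neg (by omega : ¬ h.length < 2 * m)]
      rw [if_pos (by simpa using hd)]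
    · by_cases hb : blockEq h m 1 = true
      · -- branch taken: A's loop value = B's count
        rw [if_pos ⟨by omega, hbl.mpr hb, by rw [hg1, hg2]; exact fun hx => hd hx⟩]
        rw [bTry]
        simp only [if_neg (by omega : ¬ h.length < 2 * m)]
        rw [if_neg (by simpa using hd)]
        have hcnt : bCount h m hm 1 = bCount h m hm 2 := bCount_one h m hm ⟨hn, hb⟩
        have hge : (2 : Nat) ≤ bCount h m hm 2 := bCount_ge h m hm _ 2 (Nat.le_refl _)
        rw [if_pos (by omega : 2 ≤ bCount h m hm 1)]
        rw [hfrom, hto, hcnt]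
        have := loop_eq h m hm (h.length - 2 * m) 2 (by omega) (by omega) (by omega)
        simpa using this
      · -- blocks differ: both fall through
        rw [if_neg (by rintro ⟨_, h2, _⟩; exact hb (hbl.mp h2)), bTry]
        simp only [if_neg (by omega : ¬ h.length < 2 * m)]
        rw [if_neg (by simpa using hd)]
        rw [if_neg (by rw [bCount_one_stop h m hm (fun hx => hb hx.2)]; omega)]

-- ===== VERDICT (by name: the statement is the Claim_ definition above) =====
theorem repeatedHistory_spec : Claim_equal_repeatedHistory := by
  intro h _
  unfold Spec_repeatedHistory
  have t2 := try_branch h 2 (by norm_num)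
  have t4 := try_branch h 4 (by norm_num)
  have t6 := try_branch h 6 (by norm_num)
  norm_num at t2 t4 t6
  rw [repeatedHistory, repeatedHistory_alt]
  rw [← t2, ← t4, ← t6]
  by_cases g2 : 3 < h.length ∧
      PySem.List.slice h (some (-4)) (some (-2)) = PySem.List.slice h (some (-2)) none ∧
      PySem.List.pyGet? h (-1) ≠ PySem.List.pyGet? h (-2)
  · rw [if_pos g2, if_pos g2]
  · rw [if_neg g2, if_neg g2]
    by_cases g4 : 7 < h.length ∧
        PySem.List.slice h (some (-8)) (some (-4)) = PySem.List.slice h (some (-4)) none ∧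
        PySem.List.pyGet? h (-1) ≠ PySem.List.pyGet? h (-3)
    · rw [if_pos g4, if_pos g4]
    · rw [if_neg g4, if_neg g4]
      by_cases g6 : 11 < h.length ∧
          PySem.List.slice h (some (-12)) (some (-6)) = PySem.List.slice h (some (-6)) none ∧
          PySem.List.pyGet? h (-1) ≠ PySem.List.pyGet? h (-4)
      · rw [if_pos g6, if_pos g6]
      · rw [if_neg g6, if_neg g6]
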